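-- pv_equiv track=rewrite | github.com/ayoubzulfiqar/Leetcode-Medium | CalculatetheInfluenceofEachSalesperson/calculate_the_influence_of_each_salesperson.py | calculate_salesperson_influence
-- ===== SOURCE A (Python) =====
-- import collections
--
-- def calculate_salesperson_influence(transactions):
--     salesperson_customers = collections.defaultdict(set)
--     for salesperson_id, customer_id in transactions:
--         salesperson_customers[salesperson_id].add(customer_id)
--     salesperson_influence = {}
--     for salesperson_id, customers_set in salesperson_customers.items():
--         salesperson_influence[salesperson_id] = len(customers_set)
--     return salesperson_influence
-- ===== SOURCE B (Python) =====
-- def calculate_salesperson_influence(transactions):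
--     salespeople = dict.fromkeys(s for s, _ in transactions)
--     return {s: len({c for p, c in transactions if p == s}) for s in salespeople}
-- ===== Notes on version B (the rewrite author's own statement) =====
-- stated objective: simpler
-- what changed: Drops the one-pass dict-of-sets grouping; B first collects the ordered distinct salespeople, then for each one independently rescans the transactions with a set comprehension to count that salesperson's distinct customers (staged per-key rescans, O(n*k) instead of O(n)).
import Mathlib
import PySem

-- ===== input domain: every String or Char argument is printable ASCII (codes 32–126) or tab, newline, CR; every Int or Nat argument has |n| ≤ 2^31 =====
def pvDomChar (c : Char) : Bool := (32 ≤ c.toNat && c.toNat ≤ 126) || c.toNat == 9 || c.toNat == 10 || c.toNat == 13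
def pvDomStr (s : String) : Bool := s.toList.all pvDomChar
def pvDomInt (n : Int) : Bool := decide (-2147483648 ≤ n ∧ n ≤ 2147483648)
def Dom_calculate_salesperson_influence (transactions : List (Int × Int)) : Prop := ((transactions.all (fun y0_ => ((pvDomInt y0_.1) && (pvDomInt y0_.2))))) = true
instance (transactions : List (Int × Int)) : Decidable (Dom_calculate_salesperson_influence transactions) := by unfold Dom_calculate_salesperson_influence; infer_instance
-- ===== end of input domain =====

-- B drops A's one-pass dict-of-sets grouping: it lists the distinct salespeople, then rescans the transactions per salesperson with a set comprehension (simpler staged decomposition, not faster).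

-- ===== PORT A =====
-- defaultdict(set): d[s].add(c) = modify at key s with default empty set
def calculate_salesperson_influence (transactions : List (Int × Int)) : List (Int × Int) :=
  let salesperson_customers : PySem.Dict Int (PySem.Set Int) :=
    transactions.foldl (fun d p => d.modify p.1 PySem.Set.empty (fun s => PySem.Set.add s p.2)) PySem.Dict.empty
  let salesperson_influence : PySem.Dict Int Int :=
    salesperson_customers.items.foldl (fun d p => d.insert p.1 (PySem.Set.len p.2)) PySem.Dict.empty
  salesperson_influence.items

-- ===== PORT B =====
-- dict.fromkeys of the first components = ordered distinct salespeople; then one set comprehension per salesperson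
def calculate_salesperson_influence_alt (transactions : List (Int × Int)) : List (Int × Int) :=
  let salespeople : List Int := PySem.List.dedup (transactions.map (fun p => p.1))
  salespeople.map (fun s =>
    (s, PySem.Set.len (PySem.Set.ofList ((transactions.filter (fun p => p.1 == s)).map (fun p => p.2)))))

-- ===== PRECONDITION & SPEC =====
def Spec_calculate_salesperson_influence (transactions : List (Int × Int)) (out : List (Int × Int)) : Prop := out = calculate_salesperson_influence_alt transactions
instance (transactions : List (Int × Int)) (out : List (Int × Int)) : Decidable (Spec_calculate_salesperson_influence transactions out) := by unfold Spec_calculate_salesperson_influence; infer_instance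

-- ===== CLAIM (what is proved, stated in full; the proofs are below) =====
def Claim_equal_calculate_salesperson_influence : Prop := ∀ (transactions : List (Int × Int)), Dom_calculate_salesperson_influence transactions → Spec_calculate_salesperson_influence transactions (calculate_salesperson_influence transactions)

-- ===== LEMMAS AND PROOFS =====

-- value of A's grouping dict at any key: the set of customers seen for that key
theorem getD_foldl_modify_setadd (l : List (Int × Int)) (d : PySem.Dict Int (PySem.Set Int)) (c : Int) :
    (l.foldl (fun d p => d.modify p.1 PySem.Set.empty (fun s => PySem.Set.add s p.2)) d).getD c PySem.Set.empty
      = PySem.Set.update (d.getD c PySem.Set.empty) ((l.filter (fun p => p.1 == c)).map (fun p => p.2)) := by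
  induction l generalizing d with
  | nil => simp [PySem.Set.update]
  | cons p l ih =>
    simp only [List.foldl_cons, ih, List.filter_cons]
    by_cases h : p.1 = c
    · simp [h, PySem.Set.update_cons]
    · simp [h, PySem.Dict.getD_modify, Ne.symm h]

-- ===== VERDICT (by name: the statement is the Claim_ definition above) =====
theorem calculate_salesperson_influence_spec : Claim_equal_calculate_salesperson_influence := by
  intro ts _
  unfold Spec_calculate_salesperson_influence calculate_salesperson_influence
    calculate_salesperson_influence_alt
  set D := ts.foldl (fun d p => d.modify p.1 PySem.Set.empty (fun s => PySem.Set.add s p.2))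
    PySem.Dict.empty with hD
  have hkeys : D.keys = PySem.Set.ofList (ts.map (fun p => p.1)) := by
    rw [hD, PySem.Dict.keys_foldl_modify_key ts (fun p => p.1) PySem.Set.empty
      (fun _ p => fun s => PySem.Set.add s p.2)]
    simp [PySem.Set.update_nil_left]
  have hnd : D.keys.Nodup := hkeys ▸ PySem.Set.nodup_ofList _
  rw [PySem.Dict.items_foldl_insert_fresh D.items (fun p => p.1) (fun p => PySem.Set.len p.2)
      PySem.Dict.empty (fun _ _ => PySem.Dict.contains_empty _) (by simpa [PySem.Dict.keys] using hnd),
    PySem.Dict.items_eq_map_keys D hnd PySem.Set.empty, hkeys, PySem.List.dedup_eq_ofList,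
    List.map_map]
  simp only [PySem.Dict.empty, List.nil_append]
  refine List.map_congr_left (fun s hs => ?_)
  have hgetD : D.getD s PySem.Set.empty
      = PySem.Set.ofList ((ts.filter (fun p => p.1 == s)).map (fun p => p.2)) := by
    rw [hD, getD_foldl_modify_setadd, PySem.Dict.getD_empty]
    simp [PySem.Set.empty, PySem.Set.update_nil_left]
  simp only [Function.comp_apply, PySem.Set.len, Prod.mk.injEq, true_and]
  rw [hgetD]
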